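-- pv_equiv track=rewrite | github.com/Vermillion94/BeerLeagueStats | app/playoff.py | compute_seeds
-- ===== SOURCE A (Python) =====
-- def _tiebreak(tied: list, h2h: dict) -> list:
--     """Recursively order a tied group of team IDs.
--
--     Returns a list of teams in seed order (best first).
--     """
--     if len(tied) <= 1:
--         return list(tied)
--
--     if len(tied) == 2:
--         a, b = tied
--         ab = h2h.get((a, b), 0)
--         ba = h2h.get((b, a), 0)
--         if ab > ba:
--             return [a, b]
--         if ba > ab:
--             return [b, a]
--         return sorted(tied)
--
--     # 3+ way tie: split by record within the tying group
--     internal = {t: sum(h2h.get((t, o), 0) for o in tied if o != t) for t in tied}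
--     groups: dict = {}
--     for t in tied:
--         groups.setdefault(internal[t], []).append(t)
--
--     if len(groups) == 1:
--         # Internal records all equal → recurse into pairwise h2h pass
--         # (does nothing more useful than sorted; deterministic fallback)
--         return sorted(tied)
--
--     result = []
--     for level in sorted(groups, reverse=True):
--         result.extend(_tiebreak(groups[level], h2h))
--     return result
--
-- def compute_seeds(records: dict, h2h: dict, team_ids: list) -> list:
--     """Return team_ids ordered by final seed (best first)."""
--     by_wins: dict = {}
--     for tid in team_ids:
--         by_wins.setdefault(records.get(tid, 0), []).append(tid)
--
--     ordered = []
--     for w in sorted(by_wins, reverse=True):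
--         ordered.extend(_tiebreak(by_wins[w], h2h))
--     return ordered
-- ===== SOURCE B (Python) =====
-- def compute_seeds(records: dict, h2h: dict, team_ids: list) -> list:
--     """Return team_ids ordered by final seed (best first).
--
--     Iterative re-implementation: an explicit worklist (stack) of tied groups
--     replaces the recursive _tiebreak; the two-team special case is subsumed
--     by the general internal-record split.
--     """
--     by_wins: dict = {}
--     for tid in team_ids:
--         by_wins.setdefault(records.get(tid, 0), []).append(tid)
--
--     # push worst wins first so the best group is on top of the stack
--     stack = [by_wins[w] for w in sorted(by_wins)]
--     out = []
--     while stack: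
--         g = stack.pop()
--         if len(g) <= 1:
--             out.extend(g)
--             continue
--         buckets: dict = {}
--         for t in g:
--             s = 0
--             for o in g:
--                 if o != t:
--                     s += h2h.get((t, o), 0)
--             buckets.setdefault(s, []).append(t)
--         if len(buckets) == 1:
--             # all internal records equal: deterministic fallback
--             out.extend(sorted(g))
--         else:
--             # push ascending so the best sub-group is popped (emitted) first
--             for lvl in sorted(buckets):
--                 stack.append(buckets[lvl])
--     return out
-- ===== Notes on version B (the rewrite author's own statement) =====
-- stated objective: alternative
-- what changed: The recursive _tiebreak is replaced by an explicit worklist (stack) of tied groups with an output accumulator, and the dedicated two-team special case is dropped: the general internal-record split reproduces it, so B is a single loop that pops a group, emits it (as-is, or sorted when all internal records tie) or pushes its record-buckets back so better records are emitted first.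
import Mathlib
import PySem

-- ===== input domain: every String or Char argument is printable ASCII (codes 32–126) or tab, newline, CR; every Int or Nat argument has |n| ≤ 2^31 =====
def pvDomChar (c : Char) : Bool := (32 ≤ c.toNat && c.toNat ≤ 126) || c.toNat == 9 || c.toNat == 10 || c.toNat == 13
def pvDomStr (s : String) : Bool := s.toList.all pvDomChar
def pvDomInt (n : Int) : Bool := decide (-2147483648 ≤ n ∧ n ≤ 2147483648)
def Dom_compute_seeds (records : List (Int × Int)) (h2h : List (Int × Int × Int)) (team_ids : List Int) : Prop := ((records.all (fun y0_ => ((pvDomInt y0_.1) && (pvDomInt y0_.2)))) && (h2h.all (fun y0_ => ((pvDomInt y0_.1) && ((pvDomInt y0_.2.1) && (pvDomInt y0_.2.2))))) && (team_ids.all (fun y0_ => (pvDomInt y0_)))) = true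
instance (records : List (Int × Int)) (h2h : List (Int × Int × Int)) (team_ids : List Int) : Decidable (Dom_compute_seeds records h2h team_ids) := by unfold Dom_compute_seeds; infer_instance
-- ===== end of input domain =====

-- B replaces the recursive _tiebreak with an explicit worklist (stack) of tied
-- groups and subsumes the two-team special case under the general internal-record
-- split (objective: alternative decomposition, same cost).

-- ===== PORT A =====
-- records.get(tid, 0)
def pvGetRec (records : List (Int × Int)) (tid : Int) : Int :=
  (PySem.Dict.mk records).getD tid 0

-- h2h.get((a, b), 0)
def pvGetH2H (h2h : List (Int × Int × Int)) (a b : Int) : Int :=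
  (PySem.Dict.mk (h2h.map (fun e => ((e.1, e.2.1), e.2.2)))).getD (a, b) 0

-- sum(h2h.get((t, o), 0) for o in tied if o != t)
def pvInternalA (h2h : List (Int × Int × Int)) (tied : List Int) (t : Int) : Int :=
  ((tied.filter (fun o => o != t)).map (fun o => pvGetH2H h2h t o)).sum

-- groups: dict built by groups.setdefault(internal[t], []).append(t)
def pvGroupsA (h2h : List (Int × Int × Int)) (tied : List Int) : PySem.Dict Int (List Int) :=
  tied.foldl (fun d t => d.modify (pvInternalA h2h tied t) [] (fun v => v ++ [t])) (PySem.Dict.mk [])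

-- characterisation lemmas needed by the ports' termination proofs (cited in decreasing_by)
lemma pvGroupsA_getD (h2h : List (Int × Int × Int)) (tied : List Int) (k : Int) :
    (pvGroupsA h2h tied).getD k [] = tied.filter (fun t => pvInternalA h2h tied t == k) := by
  unfold pvGroupsA
  rw [show tied.foldl (fun d t => d.modify (pvInternalA h2h tied t) [] (fun v => v ++ [t])) (PySem.Dict.mk []) =
      (tied.map (fun t => (pvInternalA h2h tied t, t))).foldl (fun d p => d.modify p.1 [] (fun v => v ++ [p.2])) (PySem.Dict.mk []) by
    rw [List.foldl_map]]
  rw [PySem.Dict.getD_foldl_modify_append]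
  simp [PySem.Dict.getD, PySem.Dict.get?, List.filter_map, Function.comp_def]

lemma pvGroupsA_keys (h2h : List (Int × Int × Int)) (tied : List Int) :
    (pvGroupsA h2h tied).keys = PySem.Set.ofList (tied.map (pvInternalA h2h tied)) := by
  unfold pvGroupsA
  rw [PySem.Dict.keys_foldl_modify_key tied (pvInternalA h2h tied) [] (fun _ t => (fun v => v ++ [t]))]
  rfl

lemma pvGroupsA_nodup (h2h : List (Int × Int × Int)) (tied : List Int) :
    (pvGroupsA h2h tied).keys.Nodup := by
  unfold pvGroupsA
  exact PySem.Dict.nodup_keys_foldl_modify_key tied (pvInternalA h2h tied) [] (fun _ t => (fun v => v ++ [t])) _ (by simp [PySem.Dict.keys])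

lemma pvGroupsA_size (h2h : List (Int × Int × Int)) (tied : List Int) :
    (pvGroupsA h2h tied).size = (pvGroupsA h2h tied).keys.length := by
  simp [PySem.Dict.size, PySem.Dict.keys]

lemma pv_bucket_lt (h2h : List (Int × Int × Int)) (tied : List Int) (k : Int)
    (hk : k ∈ (pvGroupsA h2h tied).keys) (_hne : tied ≠ [])
    (hsz : (pvGroupsA h2h tied).size ≠ 1) :
    ((pvGroupsA h2h tied).getD k []).length < tied.length := by
  rw [pvGroupsA_getD, List.length_filter_lt_length_iff_exists]
  have hnd := pvGroupsA_nodup h2h tied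
  rw [pvGroupsA_size] at hsz
  have hlen2 : 2 ≤ (pvGroupsA h2h tied).keys.length := by
    rcases h : (pvGroupsA h2h tied).keys with _ | ⟨k1, ks⟩
    · rw [h] at hk; simp at hk
    · rcases ks with _ | ⟨k2, ks'⟩
      · exfalso; apply hsz; rw [h]; rfl
      · simp
  obtain ⟨k', hk', hkk'⟩ : ∃ k' ∈ (pvGroupsA h2h tied).keys, k' ≠ k := by
    rcases h : (pvGroupsA h2h tied).keys with _ | ⟨k1, ks⟩
    · rw [h] at hk; simp at hk
    · rcases ks with _ | ⟨k2, ks'⟩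
      · rw [h] at hlen2; simp at hlen2
      · rw [h] at hnd
        have h12 : k1 ≠ k2 := by simp at hnd; tauto
        by_cases hc : k1 = k
        · exact ⟨k2, by simp, by rw [← hc]; exact h12.symm⟩
        · exact ⟨k1, by simp, hc⟩
  rw [pvGroupsA_keys, PySem.Set.mem_ofList] at hk'
  obtain ⟨t', ht', hft⟩ := List.mem_map.mp hk'
  exact ⟨t', ht', by simp [hft, hkk']⟩

-- _tiebreak(tied, h2h)
def pvTiebreak (h2h : List (Int × Int × Int)) (tied : List Int) : List Int :=
  if _h1 : tied.length ≤ 1 then tied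
  else if _h2 : tied.length = 2 then
    let a := tied[0]!
    let b := tied[1]!
    let ab := pvGetH2H h2h a b
    let ba := pvGetH2H h2h b a
    if ba < ab then [a, b]
    else if ab < ba then [b, a]
    else PySem.List.sorted tied (fun x => x)
  else
    let groups := pvGroupsA h2h tied
    if _hsz : groups.size = 1 then PySem.List.sorted tied (fun x => x)
    else
      -- for level in sorted(groups, reverse=True): result.extend(_tiebreak(groups[level], h2h))
      -- (groups[level] with level a present key = getD level [])
      (PySem.List.sorted groups.keys (fun x => x) true).attach.foldl
        (fun acc lvl => acc ++ pvTiebreak h2h (groups.getD lvl.1 [])) []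
termination_by tied.length
decreasing_by
  exact pv_bucket_lt h2h tied lvl.1
    ((PySem.List.mem_sorted _ _ _ _).mp lvl.2)
    (by intro h; subst h; simp at _h1) _hsz

def compute_seeds (records : List (Int × Int)) (h2h : List (Int × Int × Int)) (team_ids : List Int) : List Int :=
  let by_wins := team_ids.foldl
    (fun d tid => d.modify (pvGetRec records tid) [] (fun v => v ++ [tid])) (PySem.Dict.mk [])
  (PySem.List.sorted by_wins.keys (fun x => x) true).foldl
    (fun acc w => acc ++ pvTiebreak h2h (by_wins.getD w [])) []

-- ===== PORT B =====
-- s = 0; for o in g: if o != t: s += h2h.get((t, o), 0)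
def pvScore (h2h : List (Int × Int × Int)) (g : List Int) (t : Int) : Int :=
  g.foldl (fun s o => if o != t then s + pvGetH2H h2h t o else s) 0

-- buckets.setdefault(s, []).append(t)
def pvBuckets (h2h : List (Int × Int × Int)) (g : List Int) : PySem.Dict Int (List Int) :=
  g.foldl (fun d t => d.modify (pvScore h2h g t) [] (fun v => v ++ [t])) (PySem.Dict.mk [])

lemma pv_foldl_if_add (h2h : List (Int × Int × Int)) (t : Int) :
    ∀ (l : List Int) (c : Int),
      l.foldl (fun s o => if o != t then s + pvGetH2H h2h t o else s) c
        = c + ((l.filter (fun o => o != t)).map (fun o => pvGetH2H h2h t o)).sum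
  | [], c => by simp
  | o :: l, c => by
    by_cases h : (o != t) = true
    · rw [List.foldl_cons, if_pos h, pv_foldl_if_add h2h t l]
      simp [h, add_assoc]
    · rw [List.foldl_cons, if_neg (by simp [h]), pv_foldl_if_add h2h t l]
      simp [h]

lemma pv_filter_disj (p q : Int → Bool) (hd : ∀ t, ¬(p t = true ∧ q t = true)) :
    ∀ l : List Int, (l.filter p).length + (l.filter q).length = (l.filter (fun t => p t || q t)).length
  | [] => by simp
  | a :: l => by
    have ih := pv_filter_disj p q hd l
    by_cases hp : p a = true <;> by_cases hq : q a = true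
    · exact absurd ⟨hp, hq⟩ (hd a)
    all_goals simp [hp, hq]; omega

lemma pv_sum_filter_eq (l : List Int) (f : Int → Int) :
    ∀ ks : List Int, ks.Nodup →
      (ks.map (fun k => (l.filter (fun t => f t == k)).length)).sum
        = (l.filter (fun t => decide (f t ∈ ks))).length
  | [], _ => by simp
  | a :: as, hnd => by
    simp only [List.map_cons, List.sum_cons, pv_sum_filter_eq l f as hnd.of_cons]
    have ha : a ∉ as := by simp at hnd; tauto
    rw [pv_filter_disj (fun t => f t == a) (fun t => decide (f t ∈ as))
      (by intro t ⟨h1, h2⟩; simp at h1 h2; exact ha (h1 ▸ h2)) l]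
    congr 1; apply List.filter_congr; intro t _
    by_cases h : f t = a <;> simp [h, Ne.symm]

lemma pv_sum_filter_le (l : List Int) (f : Int → Int) (ks : List Int) (hnd : ks.Nodup) :
    (ks.map (fun k => (l.filter (fun t => f t == k)).length)).sum ≤ l.length := by
  rw [pv_sum_filter_eq l f ks hnd]
  exact List.length_filter_le _ _

lemma pv_pow3 : ∀ bs : List ℕ, (∀ b ∈ bs, 1 ≤ b) → 2 ≤ bs.length →
    (bs.map (fun b => 3 ^ b)).sum < 3 ^ bs.sum := by
  have main : ∀ bs : List ℕ, (∀ b ∈ bs, 1 ≤ b) → bs ≠ [] →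
      (bs.map (fun b => 3 ^ b)).sum ≤ 3 ^ bs.sum ∧
        (2 ≤ bs.length → (bs.map (fun b => 3 ^ b)).sum < 3 ^ bs.sum) := by
    intro bs
    induction bs with
    | nil => intro _ h; exact absurd rfl h
    | cons a bs ih =>
      intro hb _
      rcases bs with _ | ⟨b0, bs'⟩
      · simp
      · have hne : (b0 :: bs') ≠ [] := by simp
        obtain ⟨ihle, _⟩ := ih (fun x hx => hb x (List.mem_cons_of_mem _ hx)) hne
        have ha : 1 ≤ a := hb a (List.mem_cons_self ..)
        have hm : 1 ≤ (b0 :: bs').sum := by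
          have := hb b0 (by simp)
          simp only [List.sum_cons]; omega
        have h3a : 3 ≤ 3 ^ a := by
          calc 3 = 3 ^ 1 := by norm_num
          _ ≤ 3 ^ a := Nat.pow_le_pow_right (by norm_num) ha
        have h3m : 3 ≤ 3 ^ (b0 :: bs').sum := by
          calc 3 = 3 ^ 1 := by norm_num
          _ ≤ 3 ^ (b0 :: bs').sum := Nat.pow_le_pow_right (by norm_num) hm
        have key : 3 ^ a + 3 ^ (b0 :: bs').sum < 3 ^ a * 3 ^ (b0 :: bs').sum := by nlinarith
        simp only [List.map_cons, List.sum_cons, pow_add] at ihle key ⊢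
        exact ⟨le_trans (Nat.add_le_add_left ihle _) key.le,
          fun _ => lt_of_le_of_lt (Nat.add_le_add_left ihle _) key⟩
  intro bs hb h2
  exact (main bs hb (by rintro rfl; simp at h2)).2 h2

lemma pvScore_eq (h2h : List (Int × Int × Int)) (g : List Int) (t : Int) :
    pvScore h2h g t = pvInternalA h2h g t := by
  unfold pvScore pvInternalA
  rw [pv_foldl_if_add]; simp

lemma pvBuckets_eq (h2h : List (Int × Int × Int)) (g : List Int) :
    pvBuckets h2h g = pvGroupsA h2h g := by
  unfold pvBuckets pvGroupsA
  simp only [pvScore_eq]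

-- termination measure lemma for the worklist loop (cited in decreasing_by)
lemma pv_split_sum_lt (h2h : List (Int × Int × Int)) (g : List Int)
    (hg : 2 ≤ g.length) (hsz : (pvBuckets h2h g).size ≠ 1) :
    ((((PySem.List.sorted (pvBuckets h2h g).keys (fun x => x)).map
        (fun lvl => (pvBuckets h2h g).getD lvl [])).reverse).map (fun b => 3 ^ b.length)).sum
      < 3 ^ g.length := by
  rw [pvBuckets_eq] at *
  simp only [List.map_reverse, List.sum_reverse, List.map_map]
  have hperm : (PySem.List.sorted (pvGroupsA h2h g).keys (fun x => x)).Perm (pvGroupsA h2h g).keys :=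
    PySem.List.sorted_perm _ _ _
  rw [(hperm.map ((fun b => 3 ^ b.length) ∘ (fun lvl => (pvGroupsA h2h g).getD lvl []))).sum_eq]
  have hform : (pvGroupsA h2h g).keys.map ((fun b => 3 ^ b.length) ∘ (fun lvl => (pvGroupsA h2h g).getD lvl []))
      = ((pvGroupsA h2h g).keys.map (fun k => ((pvGroupsA h2h g).getD k []).length)).map (fun b => 3 ^ b) := by
    rw [List.map_map]; rfl
  rw [hform]
  have hnd := pvGroupsA_nodup h2h g
  have hkeys := pvGroupsA_keys h2h g
  have hklen : 2 ≤ (pvGroupsA h2h g).keys.length := by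
    rw [pvGroupsA_size] at hsz
    rcases hK : (pvGroupsA h2h g).keys with _ | ⟨k1, ks⟩
    · exfalso
      rcases g with _ | ⟨t, g'⟩
      · simp at hg
      · have : pvInternalA h2h (t :: g') t ∈ (pvGroupsA h2h (t :: g')).keys := by
          rw [hkeys, PySem.Set.mem_ofList]; exact List.mem_map_of_mem (by simp)
        rw [hK] at this; simp at this
    · rcases ks with _ | ⟨k2, ks'⟩
      · exfalso; apply hsz; rw [hK]; rfl
      · simp
  have hpos : ∀ b ∈ (pvGroupsA h2h g).keys.map (fun k => ((pvGroupsA h2h g).getD k []).length), 1 ≤ b := by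
    intro b hb
    obtain ⟨k, hkmem, rfl⟩ := List.mem_map.mp hb
    rw [hkeys, PySem.Set.mem_ofList] at hkmem
    obtain ⟨t, ht, hft⟩ := List.mem_map.mp hkmem
    have : t ∈ (pvGroupsA h2h g).getD k [] := by
      rw [pvGroupsA_getD]; exact List.mem_filter.mpr ⟨ht, by simp [hft]⟩
    exact List.length_pos_of_mem this
  calc (((pvGroupsA h2h g).keys.map (fun k => ((pvGroupsA h2h g).getD k []).length)).map (fun b => 3 ^ b)).sum
      < 3 ^ ((pvGroupsA h2h g).keys.map (fun k => ((pvGroupsA h2h g).getD k []).length)).sum :=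
        pv_pow3 _ hpos (by simpa using hklen)
    _ ≤ 3 ^ g.length := by
        apply Nat.pow_le_pow_right (by norm_num)
        calc ((pvGroupsA h2h g).keys.map (fun k => ((pvGroupsA h2h g).getD k []).length)).sum
            = ((pvGroupsA h2h g).keys.map (fun k => (g.filter (fun t => pvInternalA h2h g t == k)).length)).sum := by
              simp only [pvGroupsA_getD]
          _ ≤ g.length := pv_sum_filter_le g (pvInternalA h2h g) _ hnd

-- the worklist loop of B (stack modelled top-first: python's stack.pop() = head,
-- stack.append over `for lvl in sorted(buckets)` = prepending the reversed block)
def pvLoop (h2h : List (Int × Int × Int)) (stack : List (List Int)) (out : List Int) : List Int :=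
  match stack with
  | [] => out
  | g :: rest =>
    if _h1 : g.length ≤ 1 then pvLoop h2h rest (out ++ g)
    else
      let buckets := pvBuckets h2h g
      if _hsz : buckets.size = 1 then
        pvLoop h2h rest (out ++ PySem.List.sorted g (fun x => x))
      else
        pvLoop h2h
          (((PySem.List.sorted buckets.keys (fun x => x)).map
              (fun lvl => buckets.getD lvl [])).reverse ++ rest) out
termination_by (stack.map (fun g => 3 ^ g.length)).sum
decreasing_by
  · have : 0 < 3 ^ g.length := Nat.pow_pos (by norm_num)
    simp only [List.map_cons, List.sum_cons]; omega
  · have : 0 < 3 ^ g.length := Nat.pow_pos (by norm_num)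
    simp only [List.map_cons, List.sum_cons]; omega
  · have h := pv_split_sum_lt h2h g (by omega) _hsz
    simp only [List.map_cons, List.sum_cons, List.map_append, List.sum_append]
    omega

def compute_seeds_alt (records : List (Int × Int)) (h2h : List (Int × Int × Int)) (team_ids : List Int) : List Int :=
  let by_wins := team_ids.foldl
    (fun d tid => d.modify (pvGetRec records tid) [] (fun v => v ++ [tid])) (PySem.Dict.mk [])
  pvLoop h2h
    (((PySem.List.sorted by_wins.keys (fun x => x)).map (fun w => by_wins.getD w [])).reverse) []

-- ===== PRECONDITION & SPEC =====
def Spec_compute_seeds (records : List (Int × Int)) (h2h : List (Int × Int × Int)) (team_ids : List Int) (out : List Int) : Prop := out = compute_seeds_alt records h2h team_ids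
instance (records : List (Int × Int)) (h2h : List (Int × Int × Int)) (team_ids : List Int) (out : List Int) : Decidable (Spec_compute_seeds records h2h team_ids out) := by unfold Spec_compute_seeds; infer_instance

-- ===== CLAIM (what is proved, stated in full; the proofs are below) =====
def Claim_equal_compute_seeds : Prop := ∀ (records : List (Int × Int)) (h2h : List (Int × Int × Int)) (team_ids : List Int), Dom_compute_seeds records h2h team_ids → Spec_compute_seeds records h2h team_ids (compute_seeds records h2h team_ids)

-- ===== LEMMAS AND PROOFS =====

lemma pvTiebreak_le_one (h2h : List (Int × Int × Int)) (g : List Int) (hg : g.length ≤ 1) :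
    pvTiebreak h2h g = g := by
  unfold pvTiebreak; simp [hg]

lemma pv_sorted_rev (xs : List Int) :
    PySem.List.sorted (PySem.Set.ofList xs) (fun x => x) true
      = (PySem.List.sorted (PySem.Set.ofList xs) (fun x => x)).reverse := by
  apply PySem.List.sorted_rev_eq_of_perm_of_pairwise_gt
  · exact (List.reverse_perm _).trans (PySem.List.sorted_perm _ _ _)
  · rw [List.pairwise_reverse]
    simpa using PySem.List.sorted_ofList_pairwise_lt xs

lemma pv_ofList_pair (x y : Int) :
    PySem.Set.ofList [x, y] = if x = y then [x] else [x, y] := by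
  by_cases h : x = y <;>
    simp [PySem.Set.ofList, PySem.Set.add, PySem.Set.empty, h, eq_comm]

lemma pv_internal_pair_left (h2h : List (Int × Int × Int)) (a b : Int) :
    pvInternalA h2h [a, b] a = if a = b then 0 else pvGetH2H h2h a b := by
  by_cases h : a = b
  · subst h; simp [pvInternalA]
  · have hba : (b != a) = true := by simp [bne_iff_ne]; exact fun e => h e.symm
    simp [pvInternalA, h, hba]

lemma pv_internal_pair_right (h2h : List (Int × Int × Int)) (a b : Int) :
    pvInternalA h2h [a, b] b = if a = b then 0 else pvGetH2H h2h b a := by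
  by_cases h : a = b
  · subst h; simp [pvInternalA]
  · have hab : (a != b) = true := by simp [bne_iff_ne, h]
    simp [pvInternalA, h, hab]

lemma pv_pair_keys (h2h : List (Int × Int × Int)) (a b : Int) :
    (pvGroupsA h2h [a, b]).keys =
      if pvInternalA h2h [a, b] a = pvInternalA h2h [a, b] b
      then [pvInternalA h2h [a, b] a]
      else [pvInternalA h2h [a, b] a, pvInternalA h2h [a, b] b] := by
  rw [pvGroupsA_keys]
  simp only [List.map_cons, List.map_nil]
  exact pv_ofList_pair _ _

lemma pvTiebreak_allequal (h2h : List (Int × Int × Int)) (g : List Int)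
    (hg : ¬ g.length ≤ 1) (hsz : (pvGroupsA h2h g).size = 1) :
    pvTiebreak h2h g = PySem.List.sorted g (fun x => x) := by
  by_cases h2 : g.length = 2
  · obtain ⟨a, b, rfl⟩ := List.length_eq_two.mp h2
    have hii : pvInternalA h2h [a, b] a = pvInternalA h2h [a, b] b := by
      by_contra hne
      rw [pvGroupsA_size, pv_pair_keys, if_neg hne] at hsz; simp at hsz
    have hab : pvGetH2H h2h a b = pvGetH2H h2h b a := by
      by_cases h : a = b
      · subst h; rfl
      · rw [pv_internal_pair_left, pv_internal_pair_right, if_neg h, if_neg h] at hii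
        exact hii
    unfold pvTiebreak
    simp [hab]
  · unfold pvTiebreak; simp [hg, h2, hsz]

lemma pvTiebreak_split (h2h : List (Int × Int × Int)) (g : List Int)
    (hg : ¬ g.length ≤ 1) (hsz : (pvGroupsA h2h g).size ≠ 1) :
    pvTiebreak h2h g =
      (((PySem.List.sorted (pvGroupsA h2h g).keys (fun x => x)).map
        (fun k => pvTiebreak h2h ((pvGroupsA h2h g).getD k []))).reverse).flatten := by
  by_cases h2 : g.length = 2
  · obtain ⟨a, b, rfl⟩ := List.length_eq_two.mp h2
    have hii : pvInternalA h2h [a, b] a ≠ pvInternalA h2h [a, b] b := by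
      intro he
      rw [pvGroupsA_size, pv_pair_keys, if_pos he] at hsz; simp at hsz
    have hne : a ≠ b := by
      intro he; subst he; exact hii rfl
    have hia : pvInternalA h2h [a, b] a = pvGetH2H h2h a b := by
      rw [pv_internal_pair_left, if_neg hne]
    have hib : pvInternalA h2h [a, b] b = pvGetH2H h2h b a := by
      rw [pv_internal_pair_right, if_neg hne]
    have habne : pvGetH2H h2h a b ≠ pvGetH2H h2h b a := by
      rw [← hia, ← hib]; exact hii
    have hkeys : (pvGroupsA h2h [a, b]).keys = [pvGetH2H h2h a b, pvGetH2H h2h b a] := by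
      rw [pv_pair_keys, if_neg hii, hia, hib]
    have hgA : (pvGroupsA h2h [a, b]).getD (pvGetH2H h2h a b) [] = [a] := by
      rw [pvGroupsA_getD]
      have e1 : (pvInternalA h2h [a, b] a == pvGetH2H h2h a b) = true := by simp [hia]
      have e2 : (pvInternalA h2h [a, b] b == pvGetH2H h2h a b) = false := by
        rw [hib]; exact beq_eq_false_iff_ne.mpr (Ne.symm habne)
      simp [List.filter, e1, e2]
    have hgB : (pvGroupsA h2h [a, b]).getD (pvGetH2H h2h b a) [] = [b] := by
      rw [pvGroupsA_getD]
      have e1 : (pvInternalA h2h [a, b] a == pvGetH2H h2h b a) = false := by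
        rw [hia]; exact beq_eq_false_iff_ne.mpr habne
      have e2 : (pvInternalA h2h [a, b] b == pvGetH2H h2h b a) = true := by simp [hib]
      simp [List.filter, e1, e2]
    rcases lt_or_gt_of_ne habne with hlt | hgt
    · have hs : PySem.List.sorted (pvGroupsA h2h [a, b]).keys (fun x => x)
          = [pvGetH2H h2h a b, pvGetH2H h2h b a] := by
        rw [hkeys]
        exact PySem.List.sorted_eq_of_perm_of_pairwise_lt _ _ _ (List.Perm.refl _) (by simp [hlt])
      rw [hs]
      simp only [List.map_cons, List.map_nil, hgA, hgB, List.reverse_cons, List.reverse_nil]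
      rw [pvTiebreak_le_one h2h [a] (by simp), pvTiebreak_le_one h2h [b] (by simp)]
      unfold pvTiebreak
      simp [hlt, not_lt_of_gt hlt]
    · have hs : PySem.List.sorted (pvGroupsA h2h [a, b]).keys (fun x => x)
          = [pvGetH2H h2h b a, pvGetH2H h2h a b] := by
        rw [hkeys]
        apply PySem.List.sorted_eq_of_perm_of_pairwise_lt _ _ _ (List.Perm.swap _ _ _) (by simp [hgt])
      rw [hs]
      simp only [List.map_cons, List.map_nil, hgA, hgB, List.reverse_cons, List.reverse_nil]
      rw [pvTiebreak_le_one h2h [a] (by simp), pvTiebreak_le_one h2h [b] (by simp)]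
      unfold pvTiebreak
      simp [hgt]
  · conv_lhs => rw [pvTiebreak.eq_def]
    simp only [hg, h2, hsz, dif_neg, not_false_iff]
    rw [PySem.List.foldl_append_eq_flatMap, List.flatMap_def]
    rw [List.attach_map_val (l := PySem.List.sorted (pvGroupsA h2h g).keys (fun x => x) true)
      (f := fun k => pvTiebreak h2h ((pvGroupsA h2h g).getD k []))]
    rw [pvGroupsA_keys, pv_sorted_rev, ← pvGroupsA_keys, List.map_reverse]
    simp

lemma pvLoop_eq (h2h : List (Int × Int × Int)) :
    ∀ (stack : List (List Int)) (out : List Int),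
      pvLoop h2h stack out = out ++ (stack.map (pvTiebreak h2h)).flatten := by
  intro stack out
  induction stack, out using pvLoop.induct h2h with
  | case1 out => simp [pvLoop]
  | case2 out g rest h1 ih =>
    rw [pvLoop]
    simp only [dif_pos h1]
    rw [ih]
    simp only [List.map_cons, List.flatten_cons]
    rw [pvTiebreak_le_one h2h g h1, List.append_assoc]
  | case3 out g rest h1 bks hsz ih =>
    rw [pvLoop]
    rw [dif_neg h1, dif_pos (show (pvBuckets h2h g).size = 1 from hsz)]
    rw [ih]
    simp only [List.map_cons, List.flatten_cons]
    rw [pvTiebreak_allequal h2h g h1 (by rw [← pvBuckets_eq]; exact hsz), List.append_assoc]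
  | case4 out g rest h1 bks hsz ih =>
    rw [pvLoop]
    rw [dif_neg h1, dif_neg (show ¬ (pvBuckets h2h g).size = 1 from hsz)]
    rw [ih, List.map_append, List.flatten_append]
    simp only [List.map_cons, List.flatten_cons]
    simp only [show bks = pvGroupsA h2h g from pvBuckets_eq h2h g]
    rw [pvTiebreak_split h2h g h1 (by rw [← pvBuckets_eq]; exact hsz)]
    simp [List.map_reverse, List.map_map, Function.comp_def]

lemma pv_wins_keys (records : List (Int × Int)) (team_ids : List Int) :
    (team_ids.foldl (fun d tid => d.modify (pvGetRec records tid) [] (fun v => v ++ [tid]))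
        (PySem.Dict.mk [])).keys
      = PySem.Set.ofList (team_ids.map (pvGetRec records)) := by
  rw [PySem.Dict.keys_foldl_modify_key team_ids (pvGetRec records) [] (fun _ t => (fun v => v ++ [t]))]
  rfl

theorem pv_main (records : List (Int × Int)) (h2h : List (Int × Int × Int)) (team_ids : List Int) :
    compute_seeds records h2h team_ids = compute_seeds_alt records h2h team_ids := by
  unfold compute_seeds compute_seeds_alt
  rw [pvLoop_eq]
  rw [PySem.List.foldl_append_eq_flatMap, List.flatMap_def]
  rw [pv_wins_keys, pv_sorted_rev, ← pv_wins_keys, List.map_reverse]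
  simp [List.map_map, Function.comp_def]


-- ===== VERDICT (by name: the statement is the Claim_ definition above) =====
theorem compute_seeds_spec : Claim_equal_compute_seeds := by
  intro records h2h team_ids _
  unfold Spec_compute_seeds
  exact pv_main records h2h team_ids
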